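-- pv_equiv track=rewrite | github.com/Shoma-DS/team-info | .agent/skills/viral-template-generator/scripts/split_subtitles.py | _pack_newline_groups
-- ===== SOURCE A (Python) =====
-- def _pack_newline_groups(sentence_line_groups: list[list[str]], max_lines: int) -> list[str]:
--     result: list[str] = []
--     current: list[str] = []
--
--     for lines in sentence_line_groups:
--         if not lines:
--             continue
--
--         if current and len(current) + len(lines) <= max_lines:
--             current.extend(lines)
--             continue
--
--         if current:
--             result.append("\n".join(current))
--             current = []
--
--         if len(lines) <= max_lines:
--             current = list(lines)
--             continue
--
--         start = 0
--         while start + max_lines < len(lines):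
--             result.append("\n".join(lines[start:start + max_lines]))
--             start += max_lines
--         current = list(lines[start:])
--
--     if current:
--         result.append("\n".join(current))
--
--     return result or [""]
-- ===== SOURCE B (Python) =====
-- def _pack_newline_groups(sentence_line_groups: list[list[str]], max_lines: int) -> list[str]:
--     # Pass 1: flatten the groups into units of at most max_lines lines each.
--     units: list[list[str]] = []
--     for g in sentence_line_groups:
--         if not g:
--             continue
--         while len(g) > max_lines:
--             units.append(g[:max_lines])
--             g = g[max_lines:]
--         units.append(g)
--     # Pass 2: one uniform greedy packer over the units.
--     result: list[str] = []
--     current: list[str] = []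
--     for u in units:
--         if current and len(current) + len(u) <= max_lines:
--             current = current + u
--         else:
--             if current:
--                 result.append("\n".join(current))
--             current = u
--     if current:
--         result.append("\n".join(current))
--     return result or [""]
-- ===== Notes on version B (the rewrite author's own statement) =====
-- stated objective: alternative
-- what changed: Replaced A's single fused loop with three interleaved branches (merge / flush / inner chunking while-loop) by a two-pass design: a first pass splits the groups into a flat list of units of at most max_lines lines, and a second uniform greedy packer folds the units with one accumulator.
import Mathlib
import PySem

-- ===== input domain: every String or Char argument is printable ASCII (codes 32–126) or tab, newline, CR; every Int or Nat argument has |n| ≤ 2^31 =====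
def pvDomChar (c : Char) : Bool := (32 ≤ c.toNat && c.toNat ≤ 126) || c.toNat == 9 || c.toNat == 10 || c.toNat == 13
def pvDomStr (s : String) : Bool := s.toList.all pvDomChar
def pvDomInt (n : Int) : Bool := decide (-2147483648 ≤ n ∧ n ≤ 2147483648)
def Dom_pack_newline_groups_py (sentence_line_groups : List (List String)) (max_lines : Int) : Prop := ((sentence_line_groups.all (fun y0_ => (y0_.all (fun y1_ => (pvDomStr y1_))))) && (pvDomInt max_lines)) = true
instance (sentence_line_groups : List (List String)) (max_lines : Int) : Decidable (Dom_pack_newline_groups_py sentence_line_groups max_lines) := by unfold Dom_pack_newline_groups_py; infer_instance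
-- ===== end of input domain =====

-- B replaces A's fused three-branch loop by a two-pass design (split into ≤max_lines units, then one uniform greedy packer); same cost, proved equal on Pre_.


-- ===== PORT A =====
def pvJoinNl (xs : List String) : String := PySem.Str.join "\n" xs

-- the inner 'while start + max_lines < len(lines)' loop; the '0 < m' guard only makes it total
-- (with m ≤ 0 the Python loop never terminates; such inputs are outside Pre_)
def packAWhile (lines : List String) (m : Int) (start : Int) (res : List String) : List String × Int :=
  if h : 0 < m ∧ start + m < (lines.length : Int) then
    packAWhile lines m (start + m) (res ++ [pvJoinNl (PySem.List.slice lines (some start) (some (start + m)))])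
  else
    (res, start)
termination_by ((lines.length : Int) - start).toNat
decreasing_by omega

def packAStep (m : Int) (st : List String × List String) (lines : List String) : List String × List String :=
  match st with
  | (result, current) =>
    if lines = [] then (result, current)
    else if current ≠ [] ∧ (current.length : Int) + (lines.length : Int) ≤ m then
      (result, current ++ lines)
    else
      let result := if current ≠ [] then result ++ [pvJoinNl current] else result
      if (lines.length : Int) ≤ m then (result, lines)
      else
        let p := packAWhile lines m 0 result
        (p.1, PySem.List.slice lines (some p.2) none)

def pack_newline_groups_py (sentence_line_groups : List (List String)) (max_lines : Int) : List String :=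
  let st := sentence_line_groups.foldl (packAStep max_lines) ([], [])
  let result := if st.2 ≠ [] then st.1 ++ [pvJoinNl st.2] else st.1
  if result = [] then [""] else result

-- ===== PORT B =====
-- pass 1 splitter: 'while len(g) > max_lines: …' then append the remainder; '0 < m' guard only makes it total
def splitGroup (m : Int) (g : List String) : List (List String) :=
  if g = [] then []
  else if h : 0 < m ∧ m < (g.length : Int) then
    PySem.List.slice g none (some m) :: splitGroup m (PySem.List.slice g (some m) none)
  else [g]
termination_by g.length
decreasing_by
  rw [PySem.List.slice_from g (le_of_lt h.1)]
  simp only [List.length_drop]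
  omega

def packBStep (m : Int) (st : List String × List String) (u : List String) : List String × List String :=
  match st with
  | (result, current) =>
    if current ≠ [] ∧ ((current.length : Int) + (u.length : Int) ≤ m) then
      (result, current ++ u)
    else
      ((if current ≠ [] then result ++ [pvJoinNl current] else result), u)

def pack_newline_groups_py_alt (sentence_line_groups : List (List String)) (max_lines : Int) : List String :=
  let units := sentence_line_groups.flatMap (splitGroup max_lines)
  let st := units.foldl (packBStep max_lines) ([], [])
  let result := if st.2 ≠ [] then st.1 ++ [pvJoinNl st.2] else st.1
  if result = [] then [""] else result

-- ===== PRECONDITION & SPEC =====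
-- Pre_ excludes exactly the inputs where A never terminates: max_lines ≤ 0 together with some nonempty group.
def Pre_pack_newline_groups_py (sentence_line_groups : List (List String)) (max_lines : Int) : Prop :=
  1 ≤ max_lines ∨ ∀ g ∈ sentence_line_groups, g = []
instance (sentence_line_groups : List (List String)) (max_lines : Int) : Decidable (Pre_pack_newline_groups_py sentence_line_groups max_lines) := by unfold Pre_pack_newline_groups_py; infer_instance

def pvWitness_pack_newline_groups_py : List (List String) × Int := ([["a", "b"], ["c"], []], 2)

def Spec_pack_newline_groups_py (sentence_line_groups : List (List String)) (max_lines : Int) (out : List String) : Prop := out = pack_newline_groups_py_alt sentence_line_groups max_lines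
instance (sentence_line_groups : List (List String)) (max_lines : Int) (out : List String) : Decidable (Spec_pack_newline_groups_py sentence_line_groups max_lines out) := by unfold Spec_pack_newline_groups_py; infer_instance

-- ===== CLAIM (what is proved, stated in full; the proofs are below) =====
def Claim_equal_pack_newline_groups_py : Prop := ∀ (sentence_line_groups : List (List String)) (max_lines : Int), Dom_pack_newline_groups_py sentence_line_groups max_lines → Pre_pack_newline_groups_py sentence_line_groups max_lines → Spec_pack_newline_groups_py sentence_line_groups max_lines (pack_newline_groups_py sentence_line_groups max_lines)

-- ===== LEMMAS AND PROOFS =====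

theorem splitGroup_nil (m : Int) : splitGroup m [] = [] := by
  rw [splitGroup]; simp

theorem splitGroup_ne_nil (m : Int) (g : List String) (hg : g ≠ []) : splitGroup m g ≠ [] := by
  rw [splitGroup]; split_ifs <;> simp_all

theorem splitGroup_small (m : Int) (g : List String) (hg : g ≠ [])
    (h : ¬(0 < m ∧ m < (g.length : Int))) : splitGroup m g = [g] := by
  rw [splitGroup, if_neg hg, dif_neg h]

theorem splitGroup_big (m : Int) (g : List String) (hm : 0 < m) (hlen : m < (g.length : Int)) :
    splitGroup m g = g.take m.toNat :: splitGroup m (g.drop m.toNat) := by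
  have hg : g ≠ [] := by intro h; subst h; simp at hlen; omega
  rw [splitGroup, if_neg hg, dif_pos ⟨hm, hlen⟩,
    PySem.List.slice_to g (le_of_lt hm), PySem.List.slice_from g (le_of_lt hm)]

-- every unit splitGroup produces is nonempty and has at most m lines (m ≥ 1)
theorem splitGroup_units (m : Int) (hm : 1 ≤ m) (g : List String) :
    ∀ u ∈ splitGroup m g, u ≠ [] ∧ (u.length : Int) ≤ m := by
  generalize hn : g.length = n
  induction n using Nat.strong_induction_on generalizing g with
  | _ n ih =>
    subst hn
    by_cases hg : g = []
    · subst hg; simp [splitGroup_nil]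
    by_cases hbig : m < (g.length : Int)
    · rw [splitGroup_big m g (by omega) hbig]
      intro u hu
      rcases List.mem_cons.mp hu with hu | hu
      · subst hu
        have hgl : g.length ≠ 0 := by simpa using hg
        constructor
        · intro hnil
          have h0 : (g.take m.toNat).length = 0 := by rw [hnil]; rfl
          rw [List.length_take] at h0
          omega
        · rw [List.length_take]; push_cast; omega
      · exact ih (g.drop m.toNat).length (by simp [List.length_drop]; omega) _ rfl u hu
    · rw [splitGroup_small m g hg (by omega)]
      intro u hu
      simp only [List.mem_singleton] at hu
      subst hu
      exact ⟨hg, by omega⟩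

theorem getLastD_of_ne_nil {α : Type} (l : List α) (hl : l ≠ []) (d d' : α) :
    l.getLastD d = l.getLastD d' := by
  rw [List.getLastD_eq_getLast?, List.getLastD_eq_getLast?]
  rcases h : l.getLast? with _ | x
  · exact absurd (List.getLast?_eq_none_iff.mp h) hl
  · rfl

theorem getLastD_cons_ne {α : Type} (x : α) (l : List α) (hl : l ≠ []) (d : α) :
    (x :: l).getLastD d = l.getLastD d := by
  rw [List.getLastD_cons]
  exact getLastD_of_ne_nil l hl x d

-- the A-side while loop followed by the final slice equals splitGroup's chunks-but-last and last chunk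
theorem packABig (m : Int) (hm : 1 ≤ m) (g : List String) :
    ∀ (start : Int) (res : List String), 0 ≤ start → start < (g.length : Int) →
      (packAWhile g m start res).1
          = res ++ (splitGroup m (g.drop start.toNat)).dropLast.map pvJoinNl
      ∧ PySem.List.slice g (some (packAWhile g m start res).2) none
          = (splitGroup m (g.drop start.toNat)).getLastD [] := by
  intro start res h0 hlt
  generalize hk : g.length - start.toNat = k
  induction k using Nat.strong_induction_on generalizing start res with
  | _ k ih =>
    have htail : (g.drop start.toNat) ≠ [] := by
      simp only [ne_eq, List.drop_eq_nil_iff, not_le]; omega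
    have hlen : (g.drop start.toNat).length = g.length - start.toNat := by
      simp [List.length_drop]
    by_cases hc : start + m < (g.length : Int)
    · -- loop body runs once more
      rw [packAWhile, dif_pos ⟨by omega, hc⟩]
      have hbig : m < ((g.drop start.toNat).length : Int) := by
        rw [hlen]; omega
      rw [splitGroup_big m _ (by omega) hbig]
      have hdd : (g.drop start.toNat).drop m.toNat = g.drop (start + m).toNat := by
        rw [List.drop_drop]; congr 1; omega
      have hrest : splitGroup m ((g.drop start.toNat).drop m.toNat) ≠ [] := by
        apply splitGroup_ne_nil
        simp only [ne_eq, List.drop_eq_nil_iff, not_le, hlen]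
        omega
      have hslice : PySem.List.slice g (some start) (some (start + m))
          = (g.drop start.toNat).take m.toNat := by
        rw [PySem.List.slice_toNat g h0 (by omega)]
        congr 1; omega
      have := ih (g.length - (start + m).toNat) (by omega) (start + m)
        (res ++ [pvJoinNl (PySem.List.slice g (some start) (some (start + m)))])
        (by omega) (by omega) rfl
      rw [List.dropLast_cons_of_ne_nil hrest, hdd] at *
      constructor
      · rw [this.1, hslice]
        simp
      · rw [this.2, hdd, getLastD_cons_ne _ _ (hdd ▸ hrest)]
    · -- loop exits: the whole tail is the last chunk
      rw [packAWhile, dif_neg (by omega)]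
      have hsmall : ¬(0 < m ∧ m < ((g.drop start.toNat).length : Int)) := by
        rw [hlen]; omega
      rw [splitGroup_small m _ htail hsmall]
      exact ⟨by simp, by simp [PySem.List.slice_from g h0]⟩

-- folding B's packer over a nonempty tail's units, starting from a FULL current chunk
theorem packB_full (m : Int) (hm : 1 ≤ m) :
    ∀ (tail : List String), tail ≠ [] → ∀ (res c : List String), c.length = m.toNat →
      (splitGroup m tail).foldl (packBStep m) (res, c)
        = (res ++ [pvJoinNl c] ++ (splitGroup m tail).dropLast.map pvJoinNl,
           (splitGroup m tail).getLastD []) := by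
  intro tail
  generalize hn : tail.length = n
  induction n using Nat.strong_induction_on generalizing tail with
  | _ n ih =>
    subst hn
    intro htail res c hc
    have hcne : c ≠ [] := by
      intro h; subst h; simp at hc; omega
    have hnomerge : ¬(c ≠ [] ∧ (c.length : Int) + (tail.length : Int) ≤ m) := by
      have : tail.length ≠ 0 := by simpa using htail
      rw [hc]; omega
    by_cases hbig : m < (tail.length : Int)
    · rw [splitGroup_big m tail (by omega) hbig]
      have htake : (tail.take m.toNat).length = m.toNat := by
        simp [List.length_take]; omega
      have hnm1 : ¬(c ≠ [] ∧ (c.length : Int) + ((tail.take m.toNat).length : Int) ≤ m) := by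
        rw [hc, htake]; omega
      have hdne : tail.drop m.toNat ≠ [] := by
        simp only [ne_eq, List.drop_eq_nil_iff, not_le]; omega
      have hrest : splitGroup m (tail.drop m.toNat) ≠ [] := splitGroup_ne_nil m _ hdne
      rw [List.foldl_cons]
      have hstep : packBStep m (res, c) (tail.take m.toNat)
          = (res ++ [pvJoinNl c], tail.take m.toNat) := by
        simp only [packBStep, if_neg hnm1, if_pos hcne]
      rw [hstep,
        ih (tail.drop m.toNat).length (by simp [List.length_drop]; omega) _ rfl hdne
          (res ++ [pvJoinNl c]) (tail.take m.toNat) htake,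
        List.dropLast_cons_of_ne_nil hrest]
      rw [List.map_cons, getLastD_cons_ne _ _ hrest]
      simp
    · rw [splitGroup_small m tail htail (by omega)]
      rw [List.foldl_cons, List.foldl_nil]
      simp only [packBStep, if_neg hnomerge, if_pos hcne]
      simp

-- per-group equality: folding B's packer over the units of g equals one A step
theorem per_group (m : Int) (hm : 1 ≤ m) (g : List String) (st : List String × List String)
    (hinv : (st.2.length : Int) ≤ m) :
    (splitGroup m g).foldl (packBStep m) st = packAStep m st g := by
  obtain ⟨res, cur⟩ := st
  by_cases hg : g = []
  · subst hg
    rw [splitGroup_nil, List.foldl_nil]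
    simp [packAStep]
  by_cases hbig : m < (g.length : Int)
  · -- oversized group: first chunk never merges; then packB_full
    have hgl : g.length ≠ 0 := by simpa using hg
    rw [splitGroup_big m g (by omega) hbig]
    have htake : (g.take m.toNat).length = m.toNat := by
      simp [List.length_take]; omega
    have hdne : g.drop m.toNat ≠ [] := by
      simp only [ne_eq, List.drop_eq_nil_iff, not_le]; omega
    have hrest : splitGroup m (g.drop m.toNat) ≠ [] := splitGroup_ne_nil m _ hdne
    have hnm1 : ¬(cur ≠ [] ∧ (cur.length : Int) + ((g.take m.toNat).length : Int) ≤ m) := by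
      rw [htake]
      rintro ⟨hne, hle⟩
      have : cur.length ≠ 0 := by simpa using hne
      omega
    have hstep : packBStep m (res, cur) (g.take m.toNat)
        = ((if cur ≠ [] then res ++ [pvJoinNl cur] else res), g.take m.toNat) := by
      simp only [packBStep, if_neg hnm1]
    rw [List.foldl_cons, hstep,
      packB_full m hm (g.drop m.toNat) hdne _ (g.take m.toNat) htake]
    -- now the A side
    have hAB := packABig m hm g 0 (if cur ≠ [] then res ++ [pvJoinNl cur] else res)
      (by omega) (by omega)
    simp only [Int.toNat_zero, List.drop_zero] at hAB
    have hnm : ¬(cur ≠ [] ∧ (cur.length : Int) + (g.length : Int) ≤ m) := by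
      rintro ⟨-, hle⟩; omega
    have hAeq : packAStep m (res, cur) g
        = ((packAWhile g m 0 (if cur ≠ [] then res ++ [pvJoinNl cur] else res)).1,
           PySem.List.slice g (some (packAWhile g m 0 (if cur ≠ [] then res ++ [pvJoinNl cur] else res)).2) none) := by
      simp only [packAStep, if_neg hg, if_neg hnm,
        if_neg (show ¬((g.length : Int) ≤ m) by omega)]
    rw [splitGroup_big m g (by omega) hbig] at hAB
    rw [List.dropLast_cons_of_ne_nil hrest] at hAB
    rw [getLastD_cons_ne _ _ hrest] at hAB
    rw [hAeq, hAB.1, hAB.2]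
    simp
  · -- small nonempty group: single unit, identical branch structure
    rw [splitGroup_small m g hg (by omega), List.foldl_cons, List.foldl_nil]
    by_cases hmerge : cur ≠ [] ∧ (cur.length : Int) + (g.length : Int) ≤ m
    · simp only [packBStep, packAStep, if_neg hg, if_pos hmerge]
    · simp only [packBStep, packAStep, if_neg hg, if_neg hmerge,
        if_pos (show (g.length : Int) ≤ m by omega)]

theorem packAStep_inv (m : Int) (hm : 1 ≤ m) (g : List String) (st : List String × List String)
    (hinv : (st.2.length : Int) ≤ m) : ((packAStep m st g).2.length : Int) ≤ m := by
  obtain ⟨res, cur⟩ := st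
  simp only at hinv
  by_cases hg : g = []
  · simpa only [packAStep, if_pos hg] using hinv
  by_cases hmerge : cur ≠ [] ∧ (cur.length : Int) + (g.length : Int) ≤ m
  · simp only [packAStep, if_neg hg, if_pos hmerge, List.length_append]
    push_cast
    omega
  by_cases hsmall : (g.length : Int) ≤ m
  · simp only [packAStep, if_neg hg, if_neg hmerge, if_pos hsmall]
    exact hsmall
  · have hgl : g.length ≠ 0 := by simpa using hg
    have hAB := packABig m hm g 0 (if cur ≠ [] then res ++ [pvJoinNl cur] else res)
      (by omega) (by omega)
    simp only [Int.toNat_zero, List.drop_zero] at hAB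
    simp only [packAStep, if_neg hg, if_neg hmerge, if_neg hsmall, hAB.2]
    have hne : splitGroup m g ≠ [] := splitGroup_ne_nil m g hg
    have hmem : (splitGroup m g).getLastD [] ∈ splitGroup m g := by
      rw [List.getLastD_eq_getLast?]
      rcases h : (splitGroup m g).getLast? with _ | x
      · exact absurd (List.getLast?_eq_none_iff.mp h) hne
      · simpa using List.mem_of_getLast? h
    exact (splitGroup_units m hm g _ hmem).2

theorem main_fold (m : Int) (hm : 1 ≤ m) (groups : List (List String)) :
    ∀ st : List String × List String, (st.2.length : Int) ≤ m →
      (groups.flatMap (splitGroup m)).foldl (packBStep m) st = groups.foldl (packAStep m) st := by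
  induction groups with
  | nil => intro st _; rfl
  | cons g gs ih =>
    intro st hinv
    rw [List.flatMap_cons, List.foldl_append, List.foldl_cons,
      per_group m hm g st hinv, ih _ (packAStep_inv m hm g st hinv)]

theorem allEmpty_fold (m : Int) (groups : List (List String))
    (hall : ∀ g ∈ groups, g = []) :
    groups.foldl (packAStep m) ([], []) = ([], []) := by
  induction groups with
  | nil => rfl
  | cons g gs ih =>
    rw [List.foldl_cons, hall g (by simp)]
    simp only [packAStep, if_true]
    exact ih (fun g hg => hall g (by simp [hg]))

-- ===== VERDICT (by name: the statement is the Claim_ definition above) =====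
theorem pack_newline_groups_py_spec : Claim_equal_pack_newline_groups_py := by
  intro groups m _ hpre
  unfold Spec_pack_newline_groups_py
  by_cases hm : 1 ≤ m
  · have hmf := main_fold m hm groups ([], []) (by simp; omega)
    simp only [pack_newline_groups_py, pack_newline_groups_py_alt, hmf]
  · have hall : ∀ g ∈ groups, g = [] := hpre.resolve_left hm
    have h1 : groups.flatMap (splitGroup m) = [] := by
      rw [List.flatMap_eq_nil_iff]
      intro g hg
      rw [hall g hg, splitGroup_nil]
    have h2 := allEmpty_fold m groups hall
    simp only [pack_newline_groups_py, pack_newline_groups_py_alt, h1, h2, List.foldl_nil]
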